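-- pv_equiv track=rewrite | github.com/ckoons/BubbleSpacetimeTheory | play/toy_264_tseitin_expanders.py | greedy_fractional
-- ===== SOURCE A (Python) =====
-- def greedy_fractional(n, clauses):
--     """Greedy fractional assignment — LP relaxation proxy.
--     Assigns variables to minimize unsatisfied clause count greedily.
--     Returns number of unsatisfied clauses (proxy for LP gap)."""
--     assignment = {}
--     for v in range(n):
--         # Try both polarities, pick the one satisfying more clauses
--         scores = {}
--         for s in [True, False]:
--             assignment[v] = s
--             satisfied = sum(1 for c in clauses
--                             if any(assignment.get(vv) == ss
--                                    for vv, ss in c if vv in assignment))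
--             scores[s] = satisfied
--         assignment[v] = max(scores, key=scores.get)
--     # Count unsatisfied
--     unsat = sum(1 for c in clauses
--                 if not any(assignment.get(v, False) == s for v, s in c))
--     return unsat
-- ===== SOURCE B (Python) =====
-- def greedy_fractional(n, clauses):
--     """Greedy assignment, incremental: keep per-clause satisfied flags so each
--     variable is scored in one pass over the still-unsatisfied clauses.
--     Unassigned variables default to False in the final count."""
--     sat = [False] * len(clauses)
--     assignment = {}
--     for v in range(n):
--         t = f = 0
--         for c, ok in zip(clauses, sat):
--             if not ok:
--                 if any(vv == v and ss for vv, ss in c):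
--                     t += 1
--                 if any(vv == v and not ss for vv, ss in c):
--                     f += 1
--         s = t >= f
--         assignment[v] = s
--         sat = [ok or any(vv == v and ss == s for vv, ss in c)
--                for c, ok in zip(clauses, sat)]
--     return sum(1 for c in clauses
--                if not any(assignment.get(v, False) == s for v, s in c))
-- ===== Notes on version B (the rewrite author's own statement) =====
-- stated objective: faster
-- what changed: B drops A's two full per-polarity re-evaluations of every clause against the whole partial assignment, instead keeping an incremental per-clause satisfied-flag list and scoring both polarities of each variable in a single pass that skips already-satisfied clauses; the final count keeps the assignment dict with unassigned variables defaulting to False.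
import Mathlib
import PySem

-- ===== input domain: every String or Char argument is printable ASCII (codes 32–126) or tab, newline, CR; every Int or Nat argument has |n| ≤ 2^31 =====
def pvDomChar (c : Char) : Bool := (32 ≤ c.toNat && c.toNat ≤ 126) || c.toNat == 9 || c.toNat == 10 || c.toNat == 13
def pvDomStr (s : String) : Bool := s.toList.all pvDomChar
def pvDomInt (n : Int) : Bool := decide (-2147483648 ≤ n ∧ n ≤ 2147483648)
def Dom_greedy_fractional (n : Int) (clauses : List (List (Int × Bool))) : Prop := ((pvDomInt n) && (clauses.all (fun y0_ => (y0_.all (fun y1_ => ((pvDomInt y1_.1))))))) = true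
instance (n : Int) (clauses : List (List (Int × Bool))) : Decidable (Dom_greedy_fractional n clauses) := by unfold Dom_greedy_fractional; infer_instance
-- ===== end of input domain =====

-- B replaces A's per-polarity full re-evaluation of every clause with incremental
-- per-clause satisfied flags, scoring both polarities of each variable in one pass
-- (objective: faster by a constant factor; same return value everywhere).


-- ===== PORT A =====
-- max(scores, key=scores.get): first key attaining the maximum value (strict '>' while folding)
def pvMaxKey (items : List (Bool × Int)) : Bool :=
  match items with
  | [] => true   -- unreachable: Python max on an empty dict would raise; scores always has 2 keys
  | p :: rest => (rest.foldl (fun best q => if q.2 > best.2 then q else best) p).1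

-- 'any(assignment.get(vv) == ss for vv, ss in c if vv in assignment)'
def aClauseSat (d : PySem.Dict Int Bool) (c : List (Int × Bool)) : Bool :=
  c.any (fun p => d.contains p.1 && (d.get? p.1 == some p.2))

-- loop body of 'for v in range(n)': try both polarities, keep the best
-- (the two trial mutations assignment[v] = s are the 'd.insert v s' inside the scores)
def aStep (clauses : List (List (Int × Bool))) (d : PySem.Dict Int Bool) (v : Int) :
    PySem.Dict Int Bool :=
  let scores : List (Bool × Int) :=
    [true, false].map (fun s =>
      (s, (clauses.countP (fun c => aClauseSat (d.insert v s) c) : Int)))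
  d.insert v (pvMaxKey scores)

def greedy_fractional (n : Int) (clauses : List (List (Int × Bool))) : Int :=
  let assignment := (PySem.List.pyRange 0 n 1).foldl (aStep clauses) PySem.Dict.empty
  -- sum(1 for c in clauses if not any(assignment.get(v, False) == s for v, s in c))
  (clauses.countP (fun c => !(c.any (fun p => assignment.getD p.1 false == p.2))) : Int)

-- ===== PORT B =====
-- loop body of 'for v in range(n)' in Source B: one pass scoring both polarities over
-- the still-unsatisfied clauses, record the chosen polarity, refresh the flags
def bStep (clauses : List (List (Int × Bool))) (st : PySem.Dict Int Bool × List Bool)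
    (v : Int) : PySem.Dict Int Bool × List Bool :=
  let tf := (clauses.zip st.2).foldl (fun (tf : Int × Int) co =>
      if !co.2 then
        let tf1 := if co.1.any (fun l => l.1 == v && l.2) then (tf.1 + 1, tf.2) else tf
        if co.1.any (fun l => l.1 == v && !l.2) then (tf1.1, tf1.2 + 1) else tf1
      else tf) (0, 0)
  let s : Bool := tf.1 ≥ tf.2
  (st.1.insert v s,
   (clauses.zip st.2).map (fun co => co.2 || co.1.any (fun l => l.1 == v && l.2 == s)))

def greedy_fractional_alt (n : Int) (clauses : List (List (Int × Bool))) : Int :=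
  let st := (PySem.List.pyRange 0 n 1).foldl (bStep clauses)
      (PySem.Dict.empty, clauses.map (fun _ => false))
  -- sum(1 for c in clauses if not any(assignment.get(v, False) == s for v, s in c))
  (clauses.countP (fun c => !(c.any (fun p => st.1.getD p.1 false == p.2))) : Int)

-- ===== PRECONDITION & SPEC =====
def Spec_greedy_fractional (n : Int) (clauses : List (List (Int × Bool))) (out : Int) : Prop := out = greedy_fractional_alt n clauses
instance (n : Int) (clauses : List (List (Int × Bool))) (out : Int) : Decidable (Spec_greedy_fractional n clauses out) := by unfold Spec_greedy_fractional; infer_instance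

-- ===== CLAIM (what is proved, stated in full; the proofs are below) =====
def Claim_equal_greedy_fractional : Prop := ∀ (n : Int) (clauses : List (List (Int × Bool))), Dom_greedy_fractional n clauses → Spec_greedy_fractional n clauses (greedy_fractional n clauses)

-- ===== LEMMAS AND PROOFS =====

-- 'clause c has the literal (v, s)'
def hasLit (v : Int) (s : Bool) (c : List (Int × Bool)) : Bool :=
  c.any (fun p => p.1 == v && p.2 == s)

lemma any_or (c : List (Int × Bool)) (f g : Int × Bool → Bool) :
    c.any (fun p => f p || g p) = (c.any f || c.any g) := by
  induction c with
  | nil => rfl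
  | cons p c ih => simp [List.any_cons, ih]; cases f p <;> cases g p <;> simp

lemma countP_or (l : List (List (Int × Bool))) (a b : List (Int × Bool) → Bool) :
    l.countP (fun c => a c || b c) = l.countP a + l.countP (fun c => !a c && b c) := by
  induction l with
  | nil => rfl
  | cons c l ih =>
    simp only [List.countP_cons, ih]
    cases h1 : a c <;> cases h2 : b c <;> simp [h1, h2] <;> omega

-- inserting a fresh key v with value s: a clause is satisfied iff it was, or it has (v, s)
lemma aClauseSat_insert (d : PySem.Dict Int Bool) (v : Int) (s : Bool)
    (hv : d.get? v = none) (c : List (Int × Bool)) :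
    aClauseSat (d.insert v s) c = (aClauseSat d c || hasLit v s c) := by
  unfold aClauseSat hasLit
  rw [← any_or]
  apply PySem.List.any_congr_mem
  intro p _
  by_cases h : p.1 = v
  · subst h
    have hc : d.contains p.1 = false := by
      rw [PySem.Dict.contains_eq_isSome_get?, hv]; rfl
    simp [PySem.Dict.contains_eq_isSome_get?, PySem.Dict.get?_insert_self, hv]
    cases s <;> cases p.2 <;> simp
  · simp [PySem.Dict.get?_insert, h, PySem.Dict.contains_eq_isSome_get?]

lemma pvMaxKey_pair (x y : Int) :
    pvMaxKey [(true, x), (false, y)] = decide (y ≤ x) := by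
  simp only [pvMaxKey, List.foldl]
  by_cases h : y > x
  · rw [if_pos h]
    simp
    omega
  · rw [if_neg h]
    simp
    omega

-- the scoring fold of B computes the two unsatisfied-clause literal counts
lemma tf_fold (d : PySem.Dict Int Bool) (v : Int) (cs : List (List (Int × Bool)))
    (x y : Int) :
    (cs.map (fun c => (c, aClauseSat d c))).foldl (fun (tf : Int × Int) co =>
        if !co.2 then
          let tf1 := if co.1.any (fun l => l.1 == v && l.2) then (tf.1 + 1, tf.2) else tf
          if co.1.any (fun l => l.1 == v && !l.2) then (tf1.1, tf1.2 + 1) else tf1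
        else tf) (x, y)
    = (x + (cs.countP (fun c => !aClauseSat d c && hasLit v true c) : Int),
       y + (cs.countP (fun c => !aClauseSat d c && hasLit v false c) : Int)) := by
  induction cs generalizing x y with
  | nil => simp
  | cons c cs ih =>
    have ht : (c.any fun l => l.1 == v && l.2) = hasLit v true c := by
      unfold hasLit; apply PySem.List.any_congr_mem; intro p _; simp
    have hf : (c.any fun l => l.1 == v && !l.2) = hasLit v false c := by
      unfold hasLit; apply PySem.List.any_congr_mem; intro p _; simp
    simp only [List.map_cons, List.foldl_cons, List.countP_cons, ht, hf]
    cases hs : aClauseSat d c <;>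
      cases h1 : hasLit v true c <;>
        cases h2 : hasLit v false c <;>
          · simp only [hs, h1, h2, Bool.not_true, Bool.not_false, Bool.true_and,
              Bool.false_and, Bool.and_true, Bool.and_false, reduceIte, ih, Prod.ext_iff]
            constructor <;> push_cast <;> ring

lemma zip_self_map (l : List (List (Int × Bool))) (f : List (Int × Bool) → Bool) :
    l.zip (l.map f) = l.map (fun x => (x, f x)) :=
  Eq.symm List.map_prod_left_eq_zip

-- main loop invariant: B's state is A's dict paired with the satisfaction flags of
-- the clauses under that dict
lemma loop_inv (clauses : List (List (Int × Bool))) (L : List Int)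
    (d : PySem.Dict Int Bool) (hnd : L.Nodup) (hfresh : ∀ x ∈ L, d.get? x = none) :
    L.foldl (bStep clauses) (d, clauses.map (aClauseSat d))
      = (L.foldl (aStep clauses) d,
         clauses.map (aClauseSat (L.foldl (aStep clauses) d))) := by
  induction L generalizing d with
  | nil => simp
  | cons v L ih =>
    have hv : d.get? v = none := hfresh v (by simp)
    have hsat : ∀ s, (clauses.countP fun c => aClauseSat (d.insert v s) c)
        = clauses.countP (aClauseSat d)
          + clauses.countP (fun c => !aClauseSat d c && hasLit v s c) := by
      intro s
      rw [show (fun c => aClauseSat (d.insert v s) c)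
            = (fun c => aClauseSat d c || hasLit v s c) from
          funext (fun c => aClauseSat_insert d v s hv c)]
      exact countP_or clauses _ _
    have hstepA : aStep clauses d v
        = d.insert v (decide ((clauses.countP (fun c => !aClauseSat d c && hasLit v false c) : Int)
            ≤ (clauses.countP (fun c => !aClauseSat d c && hasLit v true c) : Int))) := by
      simp only [aStep, List.map_cons, List.map_nil, hsat]
      rw [show ((clauses.countP (aClauseSat d)
              + clauses.countP (fun c => !aClauseSat d c && hasLit v true c) : Nat) : Int)
            = (clauses.countP (aClauseSat d) : Int)
              + (clauses.countP (fun c => !aClauseSat d c && hasLit v true c) : Int) by push_cast; ring,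
          show ((clauses.countP (aClauseSat d)
              + clauses.countP (fun c => !aClauseSat d c && hasLit v false c) : Nat) : Int)
            = (clauses.countP (aClauseSat d) : Int)
              + (clauses.countP (fun c => !aClauseSat d c && hasLit v false c) : Int) by push_cast; ring,
          pvMaxKey_pair]
      congr 1
      rw [decide_eq_decide]
      omega
    set s : Bool := decide ((clauses.countP (fun c => !aClauseSat d c && hasLit v false c) : Int)
            ≤ (clauses.countP (fun c => !aClauseSat d c && hasLit v true c) : Int)) with hs
    have hstepB : bStep clauses (d, clauses.map (aClauseSat d)) v
        = (d.insert v s, clauses.map (aClauseSat (d.insert v s))) := by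
      simp only [bStep, zip_self_map]
      rw [tf_fold d v clauses 0 0]
      have hsB : (decide (((0:Int) + (clauses.countP (fun c => !aClauseSat d c && hasLit v true c) : Int),
            (0:Int) + (clauses.countP (fun c => !aClauseSat d c && hasLit v false c) : Int)).1
          ≥ ((0:Int) + (clauses.countP (fun c => !aClauseSat d c && hasLit v true c) : Int),
            (0:Int) + (clauses.countP (fun c => !aClauseSat d c && hasLit v false c) : Int)).2) : Bool) = s := by
        rw [hs, decide_eq_decide]
        omega
      rw [hsB, List.map_map]
      refine congrArg (Prod.mk _) ?_
      apply List.map_congr_left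
      intro c _
      simp only [Function.comp_apply]
      rw [aClauseSat_insert d v s hv c]
      rfl
    have hfresh' : ∀ x ∈ L, (aStep clauses d v).get? x = none := by
      intro x hx
      rw [hstepA, PySem.Dict.get?_insert_of_ne d _ (by
        rintro rfl; exact (List.nodup_cons.mp hnd).1 hx)]
      exact hfresh x (by simp [hx])
    simp only [List.foldl_cons]
    rw [hstepB, ← hstepA] at *
    exact ih (aStep clauses d v) (List.nodup_cons.mp hnd).2 hfresh'

-- ===== VERDICT (by name: the statement is the Claim_ definition above) =====
theorem greedy_fractional_spec : Claim_equal_greedy_fractional := by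
  intro n clauses _
  unfold Spec_greedy_fractional greedy_fractional greedy_fractional_alt
  have hinit : (clauses.map (fun _ => false)) = clauses.map (aClauseSat PySem.Dict.empty) :=
    List.map_congr_left (fun c _ => by
      simp [aClauseSat, PySem.Dict.contains_eq_isSome_get?, PySem.Dict.get?_empty])
  rw [hinit, loop_inv clauses (PySem.List.pyRange 0 n 1) PySem.Dict.empty
    (PySem.List.nodup_pyRange_one 0 n)
    (fun x _ => PySem.Dict.get?_empty x)]
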